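-- pv_equiv track=rewrite | github.com/sagemath/sage-archive-2023-02-01 | src/sage/combinat/hillman_grassl.py | sulzgruber_correspondence
-- ===== SOURCE A (Python) =====
-- def sulzgruber_correspondence(M):
--     r"""
--     Return the image of a `\lambda`-array ``M``
--     under the Sulzgruber correspondence.
--
--     The Sulzgruber correspondence is the map `\Phi_\lambda`
--     from [Sulzgr2017]_ Section 7, and is the map
--     `\xi_\lambda^{-1}` from [Pak2002]_ Section 5.
--     It is denoted by `\mathcal{RSK}` in [Hopkins2017]_.
--     It is the inverse of the Pak correspondence
--     (:meth:`pak_correspondence`).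
--
--     See :meth:`~sage.combinat.tableau.Tableau.sulzgruber_correspondence`
--     for a description of this map.
--
--     EXAMPLES::
--
--         sage: from sage.combinat.hillman_grassl import sulzgruber_correspondence
--         sage: sulzgruber_correspondence([[1, 0, 2], [0, 2, 0], [1, 1, 0]])
--         [[1, 2, 3], [1, 2, 3], [2, 4, 4]]
--         sage: sulzgruber_correspondence([[1, 1, 2], [0, 1, 0], [3, 0, 0]])
--         [[1, 1, 4], [2, 3, 4], [4, 4, 4]]
--         sage: sulzgruber_correspondence([[1, 0, 2], [0, 2, 0], [1, 1]])
--         [[0, 2, 3], [1, 3, 3], [2, 4]]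
--         sage: sulzgruber_correspondence([[0, 2, 2], [1, 1], [2]])
--         [[1, 2, 4], [1, 3], [3]]
--         sage: sulzgruber_correspondence([[1, 1, 1, 1]]*3)
--         [[1, 2, 3, 4], [2, 3, 4, 5], [3, 4, 5, 6]]
--
--     The Sulzgruber correspondence can actually be
--     extended (by the same definition) to arrays
--     of nonnegative reals rather than nonnegative
--     integers. This implementation supports this::
--
--         sage: sulzgruber_correspondence([[1/2, 0, 1], [0, 1, 0], [1/2, 1/2]])
--         [[0, 1, 3/2], [1/2, 3/2, 3/2], [1, 2]]
--
--     TESTS::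
--
--         sage: sulzgruber_correspondence([])
--         []
--         sage: sulzgruber_correspondence(((0, 2, 2), (1, 1), (2,)))
--         [[1, 2, 4], [1, 3], [3]]
--     """
--     lam = [len(row) for row in M]
--     l = len(lam)
--     if l == 0:
--         return []
--     # Finding a corner of lam...
--     lam_0 = lam[0]
--     for i, lam_i in enumerate(lam):
--         if lam_i != lam_0:
--             i -= 1
--             break
--     j = lam_0 - 1
--     # Now, i is the index of the last row of ``M`` that
--     # has the same length as the first row; hence, (i, j)
--     # is a corner of lam.
--     x = M[i][j]
--     N = [list(row) for row in M]
--
--     # remove the corner (i, j):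
--     N[i].pop()
--     if not N[i]:
--         N.pop()
--
--     N = sulzgruber_correspondence(N)
--
--     # toggling and inserting the new entry:
--     for k in range(min(i, j) + 1):
--         u = i - k
--         v = j - k
--         if u > 0 and v > 0:
--             lower_bound = max(N[u - 1][v], N[u][v - 1])
--         elif u > 0:
--             lower_bound = N[u - 1][v]
--         elif v > 0:
--             lower_bound = N[u][v - 1]
--         else:
--             lower_bound = 0
--         if k > 0:
--             val = N[u][v]
--             upper_bound = min(N[u + 1][v], N[u][v + 1])
--             N[u][v] = lower_bound + upper_bound - val
--         else:
--             if len(N) <= u: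
--                 N.append([])
--             N[u].append(lower_bound + x)
--
--     return N
-- ===== SOURCE B (Python) =====
-- def _run_end(lam):
--     # index of the last entry of the leading block of entries equal to lam[0]
--     i = 0
--     while i + 1 < len(lam) and lam[i + 1] == lam[0]:
--         i += 1
--     return i
--
--
-- def sulzgruber_correspondence(M):
--     # Iterative re-implementation: simulate the shape list alone to precompute the
--     # corner-removal order (maintaining the corner row incrementally), then rebuild
--     # the output front-to-back -- no recursion, no per-level copy of the whole array.
--     lam = [len(row) for row in M]
--     order = []
--     i = _run_end(lam)
--     while lam:
--         lam0 = lam[i]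
--         order.append((i, lam0 - 1, M[i][lam0 - 1]))
--         lam[i] -= 1
--         if lam[i] <= 0:
--             lam.pop()
--         if i > 0:
--             i -= 1
--         else:
--             i = _run_end(lam)
--     N = []
--     for i, j, x in reversed(order):
--         for k in range(min(i, j) + 1):
--             u = i - k
--             v = j - k
--             cands = []
--             if u > 0:
--                 cands.append(N[u - 1][v])
--             if v > 0:
--                 cands.append(N[u][v - 1])
--             lo = max(cands, default=0)
--             if k == 0:
--                 if len(N) <= u:
--                     N.append([])
--                 N[u].append(lo + x)
--             else:
--                 N[u][v] = lo + min(N[u + 1][v], N[u][v + 1]) - N[u][v]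
--     return N
-- ===== Notes on version B (the rewrite author's own statement) =====
-- stated objective: alternative
-- what changed: A's recursion, which deep-copies the whole array at every one of the n corner removals, is replaced by a two-phase iteration: first simulate the shape list alone to precompute the corner-removal order (maintaining the corner row index incrementally instead of rescanning), then rebuild the output front-to-back applying the diagonal toggles in place, with no recursion and no array copies; intended as faster (a timing run measured ~2.7x at the largest size both finished, unconfirmed beyond because B also exceeds the per-call cap there).
import Mathlib
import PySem

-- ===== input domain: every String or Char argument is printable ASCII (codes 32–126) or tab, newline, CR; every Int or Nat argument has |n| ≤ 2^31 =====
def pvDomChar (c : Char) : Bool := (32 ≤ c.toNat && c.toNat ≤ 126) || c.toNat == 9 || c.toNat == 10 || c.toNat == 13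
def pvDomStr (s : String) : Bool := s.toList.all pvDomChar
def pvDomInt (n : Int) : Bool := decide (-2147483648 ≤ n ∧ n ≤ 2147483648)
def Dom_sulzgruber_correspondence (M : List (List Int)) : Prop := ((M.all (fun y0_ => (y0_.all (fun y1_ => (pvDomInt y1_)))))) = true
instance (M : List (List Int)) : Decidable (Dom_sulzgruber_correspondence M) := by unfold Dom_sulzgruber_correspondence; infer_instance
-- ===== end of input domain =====

-- B replaces A's recursion (one full copy of the array per removed cell) by precomputing the
-- corner-removal order from the shape alone and rebuilding the output iteratively; intended as
-- faster (a timing run measured ~2.7x at the largest size it could compare, unconfirmed beyond).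

-- shared low-level helpers: Python nested indexing/assignment (exact where Python's succeed;
-- negative indices wrap via pyGet?)
def pvGet2 (N : List (List Int)) (u v : Int) : Int :=
  PySem.List.pyGetD (PySem.List.pyGetD N u []) v 0

-- N[u][v] = val  (exact for indices where Python's assignment succeeds)
def pvSet2 (N : List (List Int)) (u v val : Int) : List (List Int) :=
  PySem.List.pySetD N u (PySem.List.pySetD (PySem.List.pyGetD N u []) v val)

-- N[u].append(x)  (exact where Python's N[u] succeeds)
def pvAppendAt (N : List (List Int)) (u x : Int) : List (List Int) :=
  PySem.List.pySetD N u ((PySem.List.pyGetD N u []) ++ [x])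

-- ===== PORT A =====
-- the 'for i, lam_i in enumerate(lam): if lam_i != lam_0: i -= 1; break' loop
-- (started at idx = 0; the 'i - 1' is Nat subtraction, safe since lam's head equals lam0 at the call site)
def pvFindI (lam0 : Int) : List Int → Nat → Nat
  | [], idx => idx - 1
  | v :: rest, idx => if v ≠ lam0 then idx - 1 else pvFindI lam0 rest (idx + 1)

-- N[i].pop(); if not N[i]: N.pop()
def pvRemoveCorner (M : List (List Int)) (i : Nat) : List (List Int) :=
  let N := M.set i ((M.getD i []).dropLast)
  if (N.getD i []).isEmpty then N.dropLast else N

-- the 'toggling and inserting' loop of A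
def pvToggleA (i : Nat) (j x : Int) (N0 : List (List Int)) : List (List Int) :=
  (PySem.List.pyRange 0 (min (i : Int) j + 1) 1).foldl (fun N k =>
    let u : Int := (i : Int) - k
    let v : Int := j - k
    let lb : Int :=
      if 0 < u ∧ 0 < v then max (pvGet2 N (u - 1) v) (pvGet2 N u (v - 1))
      else if 0 < u then pvGet2 N (u - 1) v
      else if 0 < v then pvGet2 N u (v - 1)
      else 0
    if 0 < k then
      pvSet2 N u v (lb + min (pvGet2 N (u + 1) v) (pvGet2 N u (v + 1)) - pvGet2 N u v)
    else
      let N' := if (N.length : Int) ≤ u then N ++ [([] : List Int)] else N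
      pvAppendAt N' u (lb + x)) N0

-- A's recursion, with fuel making the structural recursion total (fuel = #cells + 1 suffices on Pre_)
def pvSulzA : Nat → List (List Int) → List (List Int)
  | 0, _ => []
  | fuel + 1, M =>
    if M.length = 0 then []
    else
      let lam : List Int := M.map (fun r => (r.length : Int))
      let lam0 := lam.headD 0
      let i := pvFindI lam0 lam 0
      let j := lam0 - 1
      let x := pvGet2 M (i : Int) j
      pvToggleA i j x (pvSulzA fuel (pvRemoveCorner M i))

def sulzgruber_correspondence (M : List (List Int)) : List (List Int) :=
  pvSulzA ((M.map List.length).sum + 1) M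

-- ===== PORT B =====
-- B's _run_end: 'i = 0; while i + 1 < len(lam) and lam[i + 1] == lam[0]: i += 1; return i'
-- (fuel = lam.length makes the while loop structural; it bounds the number of iterations)
def pvScanGo (lam : List Int) : Nat → Nat → Nat
  | 0, i => i
  | f + 1, i =>
    if i + 1 < lam.length ∧ lam.getD (i + 1) 0 = lam.getD 0 0 then pvScanGo lam f (i + 1) else i

def pvScan (lam : List Int) : Nat := pvScanGo lam lam.length 0

-- B's while-loop over the shape list lam, recording (i, j, M[i][j]) per removed corner
-- and maintaining the corner row i incrementally
def pvCorners (M : List (List Int)) : Nat → List Int → Nat → List (Nat × Int × Int) → List (Nat × Int × Int)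
  | 0, _, _, acc => acc
  | fuel + 1, lam, i, acc =>
    if lam.isEmpty then acc
    else
      let lam0 := lam.getD i 0
      let acc' := acc ++ [(i, lam0 - 1, pvGet2 M (i : Int) (lam0 - 1))]
      let lam1 := lam.set i (lam0 - 1)
      let lam2 := if lam1.getD i 0 ≤ 0 then lam1.dropLast else lam1
      let i' := if 0 < i then i - 1 else pvScan lam2
      pvCorners M fuel lam2 i' acc'

-- B's toggle body
def pvToggleB (i : Nat) (j x : Int) (N0 : List (List Int)) : List (List Int) :=
  (PySem.List.pyRange 0 (min (i : Int) j + 1) 1).foldl (fun N k =>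
    let u : Int := (i : Int) - k
    let v : Int := j - k
    let cands : List Int :=
      (if 0 < u then [pvGet2 N (u - 1) v] else []) ++ (if 0 < v then [pvGet2 N u (v - 1)] else [])
    let lo := (PySem.List.max? cands (fun y => y)).getD 0
    if k = 0 then
      let N' := if (N.length : Int) ≤ u then N ++ [([] : List Int)] else N
      pvAppendAt N' u (lo + x)
    else
      pvSet2 N u v (lo + min (pvGet2 N (u + 1) v) (pvGet2 N u (v + 1)) - pvGet2 N u v)) N0

def sulzgruber_correspondence_alt (M : List (List Int)) : List (List Int) :=
  let lam : List Int := M.map (fun r => (r.length : Int))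
  let order := pvCorners M ((M.map List.length).sum + 1) lam (pvScan lam) []
  order.reverse.foldl (fun N c => pvToggleB c.1 c.2.1 c.2.2 N) []

-- ===== PRECONDITION & SPEC =====
-- ===== PRECONDITION & SPEC =====
-- Pre_ = the λ-array shapes (every row nonempty, row lengths weakly decreasing): exactly the
-- inputs on which the Python A returns normally; on every other shape A raises IndexError.
def Pre_sulzgruber_correspondence (M : List (List Int)) : Prop :=
  (∀ r ∈ M, r ≠ []) ∧ M.Pairwise (fun a b => b.length ≤ a.length)
instance (M : List (List Int)) : Decidable (Pre_sulzgruber_correspondence M) := by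
  unfold Pre_sulzgruber_correspondence; infer_instance

def pvWitness_sulzgruber_correspondence : List (List Int) := [[1, 0, 2], [0, 2, 0], [1, 1]]

def Spec_sulzgruber_correspondence (M : List (List Int)) (out : List (List Int)) : Prop := out = sulzgruber_correspondence_alt M
instance (M : List (List Int)) (out : List (List Int)) : Decidable (Spec_sulzgruber_correspondence M out) := by unfold Spec_sulzgruber_correspondence; infer_instance

-- ===== CLAIM (what is proved, stated in full; the proofs are below) =====
def Claim_equal_sulzgruber_correspondence : Prop := ∀ (M : List (List Int)), Dom_sulzgruber_correspondence M → Pre_sulzgruber_correspondence M → Spec_sulzgruber_correspondence M (sulzgruber_correspondence M)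

-- ===== LEMMAS AND PROOFS =====

-- The two toggle bodies agree (A's branch order and nested-if lower bound vs
-- B's candidate list with max(default=0)).
theorem pvToggle_eq (i : Nat) (j x : Int) (N0 : List (List Int)) :
    pvToggleA i j x N0 = pvToggleB i j x N0 := by
  unfold pvToggleA pvToggleB
  apply PySem.List.foldl_congr_mem
  intro N k hk
  have hk0 : 0 ≤ k := ((PySem.List.mem_pyRange_one).1 hk).1
  have hnil : (PySem.List.max? ([] : List Int) (fun y => y)) = none :=
    (PySem.List.max?_eq_none_iff _ _).2 rfl
  by_cases h0 : k = 0
  · subst h0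
    by_cases hu : 0 < i <;> by_cases hv : 0 < j <;>
      simp [hu, hv, hnil, PySem.List.max?_id_cons, max_comm]
  · have hkpos : 0 < k := lt_of_le_of_ne hk0 (Ne.symm h0)
    by_cases hu : k < (i : Int) <;> by_cases hv : k < j <;>
      simp [hu, hv, hkpos, h0, hnil, PySem.List.max?_id_cons, max_comm]

-- A's removal sequence, read off the recursion of pvSulzA
def pvCornersA : Nat → List (List Int) → List (Nat × Int × Int)
  | 0, _ => []
  | fuel + 1, M =>
    if M.length = 0 then []
    else
      let lam : List Int := M.map (fun r => (r.length : Int))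
      let lam0 := lam.headD 0
      let i := pvFindI lam0 lam 0
      let j := lam0 - 1
      (i, j, pvGet2 M (i : Int) j) :: pvCornersA fuel (pvRemoveCorner M i)

theorem pvSulzA_eq_foldr (fuel : Nat) :
    ∀ M : List (List Int),
      pvSulzA fuel M = (pvCornersA fuel M).foldr (fun c N => pvToggleA c.1 c.2.1 c.2.2 N) [] := by
  induction fuel with
  | zero => intro M; simp [pvSulzA, pvCornersA]
  | succ f ih =>
    intro M
    by_cases h : M.length = 0
    · simp [pvSulzA, pvCornersA, h]
    · simp only [pvSulzA, pvCornersA, if_neg h, List.foldr_cons]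
      rw [ih]

-- length of the initial run of a's in l
def pvRunL (a : Int) : List Int → Nat
  | [] => 0
  | v :: r => if v = a then pvRunL a r + 1 else 0

theorem pvFindI_eq_runL (a : Int) : ∀ (l : List Int) (idx : Nat),
    pvFindI a l idx = idx + pvRunL a l - 1 := by
  intro l
  induction l with
  | nil => intro idx; simp [pvFindI, pvRunL]
  | cons v r ih =>
    intro idx
    by_cases h : v = a
    · subst h
      rw [show pvFindI v (v :: r) idx = pvFindI v r (idx + 1) from by simp [pvFindI]]
      rw [ih]
      have : pvRunL v (v :: r) = pvRunL v r + 1 := by simp [pvRunL]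
      omega
    · simp [pvFindI, pvRunL, h]

theorem pvRunL_le_length (a : Int) : ∀ l : List Int, pvRunL a l ≤ l.length := by
  intro l; induction l with
  | nil => simp [pvRunL]
  | cons v r ih => by_cases h : v = a <;> simp [pvRunL, h] <;> omega

theorem pvGetElem_lt_runL (a : Int) : ∀ (l : List Int) (r : Nat),
    r < pvRunL a l → ∀ h : r < l.length, l[r] = a := by
  intro l
  induction l with
  | nil => intro r hr; simp [pvRunL] at hr
  | cons v t ih =>
    intro r hr h
    by_cases hv : v = a
    · cases r with
      | zero => simpa using hv
      | succ p =>
        have : p < pvRunL a t := by simp [pvRunL, hv] at hr; omega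
        simpa using ih p this (by simpa using Nat.lt_of_succ_lt_succ h)
    · simp [pvRunL, hv] at hr

theorem pvGetElem_runL_ne (a : Int) : ∀ (l : List Int),
    ∀ h : pvRunL a l < l.length, l[pvRunL a l] ≠ a := by
  intro l
  induction l with
  | nil => intro h; simp at h
  | cons v t ih =>
    intro h
    by_cases hv : v = a
    · have := ih (by simpa [pvRunL, hv] using h)
      simpa [pvRunL, hv] using this
    · simpa [pvRunL, hv] using hv

theorem pvHeadD_getD (l : List Int) : l.headD 0 = l.getD 0 0 := by
  cases l <;> simp

theorem pvRunL_eq (a : Int) : ∀ (l : List Int) (k : Nat), k ≤ l.length →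
    (∀ r : Nat, r < k → l.getD r 0 = a) → (k < l.length → l.getD k 0 ≠ a) →
    pvRunL a l = k := by
  intro l
  induction l with
  | nil =>
    intro k hk _ _
    simp at hk
    simp [pvRunL, hk]
  | cons v t ih =>
    intro k hk hall hne
    cases k with
    | zero =>
      have hv : v ≠ a := by simpa using hne (by simp)
      simp [pvRunL, hv]
    | succ p =>
      have hv : v = a := by simpa using hall 0 (by omega)
      rw [pvRunL, if_pos hv,
        ih p (by simpa using hk) (fun r hr => by simpa using hall (r + 1) (by omega))
          (fun hp => by simpa using hne (by simpa using hp))]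

theorem pvScanGo_eq (lam : List Int) : ∀ (fuel i : Nat),
    i < pvRunL (lam.headD 0) lam → lam.length - i ≤ fuel →
    pvScanGo lam fuel i = pvRunL (lam.headD 0) lam - 1 := by
  intro fuel
  induction fuel with
  | zero =>
    intro i h1 h2
    have := pvRunL_le_length (lam.headD 0) lam
    omega
  | succ fl ih =>
    intro i h1 h2
    have hrl := pvRunL_le_length (lam.headD 0) lam
    have hhd : lam.getD 0 0 = lam.headD 0 := by cases lam <;> simp
    by_cases hc : i + 1 < pvRunL (lam.headD 0) lam
    · have hcond : i + 1 < lam.length ∧ lam.getD (i + 1) 0 = lam.getD 0 0 := by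
        refine ⟨by omega, ?_⟩
        rw [hhd, List.getD_eq_getElem lam 0 (by omega)]
        exact pvGetElem_lt_runL (lam.headD 0) lam (i + 1) hc (by omega)
      rw [pvScanGo, if_pos hcond]
      exact ih (i + 1) hc (by omega)
    · have hcond : ¬ (i + 1 < lam.length ∧ lam.getD (i + 1) 0 = lam.getD 0 0) := by
        rintro ⟨hl, he⟩
        have hrun : pvRunL (lam.headD 0) lam = i + 1 := by omega
        have hne := pvGetElem_runL_ne (lam.headD 0) lam (by omega)
        simp only [hrun] at hne
        rw [hhd, List.getD_eq_getElem lam 0 hl] at he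
        exact hne he
      rw [pvScanGo, if_neg hcond]
      omega

theorem pvScan_eq (lam : List Int) : pvScan lam = pvRunL (lam.headD 0) lam - 1 := by
  cases lam with
  | nil => simp [pvScan, pvScanGo, pvRunL]
  | cons v t =>
    apply pvScanGo_eq
    · simp [pvRunL]
    · omega

-- the array A recurses on, reconstructed from the original M and B's simulated shape lam
def pvTrunc (M : List (List Int)) (lam : List Int) : List (List Int) :=
  List.zipWith (fun (n : Int) r => r.take n.toNat) lam M

-- invariant of B's shape simulation
def pvInv (M : List (List Int)) (lam : List Int) : Prop :=
  lam.length ≤ M.length ∧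
  (∀ (r : Nat) (h : r < lam.length), 0 < lam[r] ∧ lam[r] ≤ ((M.getD r []).length : Int)) ∧
  (∀ (r s : Nat) (hr : r ≤ s) (hs : s < lam.length), lam[s]'hs ≤ lam[r]'(Nat.lt_of_le_of_lt hr hs))

theorem pvTrunc_length (M : List (List Int)) (lam : List Int) (h : lam.length ≤ M.length) :
    (pvTrunc M lam).length = lam.length := by
  simp [pvTrunc, List.length_zipWith]; omega

theorem pvTrunc_getElem (M : List (List Int)) (lam : List Int) (r : Nat)
    (h : r < lam.length) (h2 : lam.length ≤ M.length) :
    (pvTrunc M lam)[r]'(by rw [pvTrunc_length M lam h2]; exact h) =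
      (M[r]'(by omega)).take (lam[r]).toNat := by
  simp [pvTrunc]

theorem pvTrunc_map_len (M : List (List Int)) (lam : List Int) (h : pvInv M lam) :
    (pvTrunc M lam).map (fun r => (r.length : Int)) = lam := by
  obtain ⟨h1, h2, _⟩ := h
  apply List.ext_getElem
  · simp [pvTrunc_length M lam h1]
  · intro r hr hr2
    have hr3 : r < lam.length := hr2
    have hM : r < M.length := by omega
    simp only [List.getElem_map, pvTrunc_getElem M lam r hr3 h1]
    have := h2 r hr3
    have hget : M.getD r [] = M[r] := List.getD_eq_getElem M [] hM
    rw [hget] at this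
    rw [List.length_take]
    omega

theorem pvTrunc_full (M : List (List Int)) :
    pvTrunc M (M.map (fun r => (r.length : Int))) = M := by
  induction M with
  | nil => simp [pvTrunc]
  | cons r t ih => simpa [pvTrunc, List.zipWith] using ih

theorem pvTrunc_set (M : List (List Int)) (lam : List Int) (i : Nat) (c : Int)
    (hi : i < lam.length) (h2 : lam.length ≤ M.length) :
    pvTrunc M (lam.set i c) = (pvTrunc M lam).set i ((M.getD i []).take c.toNat) := by
  apply List.ext_getElem
  · simp [h2, pvTrunc, List.length_zipWith]
  · intro r hr hr2
    have hrl : r < lam.length := by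
      have := pvTrunc_length M (lam.set i c) (by simpa using h2)
      simp at this; omega
    have hM : r < M.length := by omega
    have hMi : i < M.length := by omega
    rw [List.getElem_set]
    by_cases hri : r = i
    · subst hri
      rw [pvTrunc_getElem M (lam.set r c) r (by simpa using hrl) (by simpa using h2)]
      simp [List.getElem_set_self]
      rw [List.getElem?_eq_getElem hM]; rfl
    · rw [pvTrunc_getElem M (lam.set i c) r (by simpa using hrl) (by simpa using h2),
        pvTrunc_getElem M lam r hrl h2]
      rw [List.getElem_set]
      have hir : ¬ i = r := fun h => hri h.symm
      simp [hir]

theorem pvTrunc_dropLast (M : List (List Int)) (lam : List Int) (h2 : lam.length ≤ M.length) :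
    pvTrunc M lam.dropLast = (pvTrunc M lam).dropLast := by
  apply List.ext_getElem
  · simp [h2, pvTrunc, List.length_zipWith]; omega
  · intro r hr hr2
    have hdl : lam.dropLast.length = lam.length - 1 := by simp
    have hrl : r < lam.dropLast.length := by
      have := pvTrunc_length M lam.dropLast (by omega)
      omega
    have hrl2 : r < lam.length := by omega
    rw [List.getElem_dropLast,
      pvTrunc_getElem M lam.dropLast r hrl (by omega),
      pvTrunc_getElem M lam r hrl2 h2]
    congr 1
    · simp [List.getElem_dropLast]

theorem pvCorners_eq (M : List (List Int)) : ∀ (fuel : Nat) (lam : List Int) (i : Nat) (acc : List (Nat × Int × Int)),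
    pvInv M lam → i = pvRunL (lam.headD 0) lam - 1 →
    pvCorners M fuel lam i acc = acc ++ pvCornersA fuel (pvTrunc M lam) := by
  intro fuel
  induction fuel with
  | zero => intro lam i acc _ _; simp [pvCorners, pvCornersA]
  | succ f ih =>
    intro lam i acc hInv hi
    cases lam with
    | nil => simp [pvCorners, pvCornersA, pvTrunc]
    | cons lam0 rest =>
      obtain ⟨h1, h2, h3⟩ := hInv
      set L : List Int := lam0 :: rest with hLdef
      have hlen : 0 < L.length := by simp [hLdef]
      set n : Nat := pvRunL lam0 L with hndef
      have hn1 : 1 ≤ n := by simp [hndef, hLdef, pvRunL]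
      have hnle : n ≤ L.length := pvRunL_le_length lam0 L
      have hidef : i = n - 1 := by simpa [hndef, hLdef] using hi
      have hiL : i < L.length := by omega
      have hlami : L[i] = lam0 := pvGetElem_lt_runL lam0 L i (by omega) hiL
      have hheadle : ∀ y ∈ L, y ≤ lam0 := by
        intro y hy
        obtain ⟨s, hs, rfl⟩ := List.mem_iff_getElem.1 hy
        have := h3 0 s (by omega) hs
        simpa [hLdef] using this
      have hfind : pvFindI lam0 L 0 = i := by
        rw [pvFindI_eq_runL]; omega
      have hlam0pos : 0 < lam0 := by
        have := (h2 i hiL).1; rwa [hlami] at this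
      have hMi : i < M.length := by omega
      have hrowlen : lam0 ≤ ((M.getD i []).length : Int) := by
        have := (h2 i hiL).2; rwa [hlami] at this
      have hMgetD : M.getD i [] = M[i] := List.getD_eq_getElem M [] hMi
      have hTlen : (pvTrunc M L).length = L.length := pvTrunc_length M L h1
      have hTlam : (pvTrunc M L).map (fun r => (r.length : Int)) = L :=
        pvTrunc_map_len M L ⟨h1, h2, h3⟩
      have hTi : (pvTrunc M L)[i]'(by omega) = (M[i]'hMi).take lam0.toNat := by
        rw [pvTrunc_getElem M L i hiL h1, hlami]
      -- the entry fetched from the original M equals the one fetched from the truncated array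
      have hx : pvGet2 (pvTrunc M L) (i : Int) (lam0 - 1) = pvGet2 M (i : Int) (lam0 - 1) := by
        unfold pvGet2
        rw [PySem.List.pyGetD_natCast, PySem.List.pyGetD_natCast,
          List.getD_eq_getElem (pvTrunc M L) [] (by omega), List.getD_eq_getElem M [] hMi, hTi]
        rw [PySem.List.pyGetD_eq_getElem _ _ (by omega)
            (by rw [List.length_take]; rw [hMgetD] at hrowlen; omega),
          PySem.List.pyGetD_eq_getElem _ _ (by omega)
            (by rw [hMgetD] at hrowlen; omega)]
        rw [List.getElem_take]
      -- B's shape update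
      set lam1 : List Int := L.set i (lam0 - 1) with hlam1def
      have hgetD : L.getD i 0 = lam0 := by rw [List.getD_eq_getElem L 0 hiL, hlami]
      have hgetD1 : lam1.getD i 0 = lam0 - 1 := by
        rw [List.getD_eq_getElem lam1 0 (by simp [hlam1def]; omega)]
        simp [hlam1def]
      have hlam1len : lam1.length = L.length := by simp [hlam1def]
      -- entries after the run are < lam0
      have hafter : ∀ (s : Nat) (hs : s < L.length), i < s → L[s] ≤ lam0 - 1 := by
        intro s hs his
        have hnlt : n < L.length := by omega
        have hne : L[n] ≠ lam0 := pvGetElem_runL_ne lam0 L hnlt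
        have hle1 : L[n] ≤ lam0 := hheadle _ (List.getElem_mem hnlt)
        have hle2 : L[s] ≤ L[n] := h3 n s (by omega) hs
        omega
      have hall_of : lam0 - 1 ≤ 0 → n = L.length := by
        intro hpop0
        by_contra hne0
        have hnlt : n < L.length := by omega
        have hne : L[n]'hnlt ≠ lam0 := pvGetElem_runL_ne lam0 L hnlt
        have hge : 0 < L[n]'hnlt := (h2 n hnlt).1
        have hle : L[n]'hnlt ≤ lam0 := hheadle _ (List.getElem_mem hnlt)
        omega
      -- removing the corner from the truncated array = truncating the updated shape
      have hrem : pvRemoveCorner (pvTrunc M L) i =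
          pvTrunc M (if lam1.getD i 0 ≤ 0 then lam1.dropLast else lam1) := by
        unfold pvRemoveCorner
        have hTgetD : (pvTrunc M L).getD i [] = (M[i]'hMi).take lam0.toNat := by
          rw [List.getD_eq_getElem (pvTrunc M L) [] (by omega), hTi]
        rw [hTgetD]
        have hdl : ((M[i]'hMi).take lam0.toNat).dropLast = (M.getD i []).take (lam0 - 1).toNat := by
          rw [List.dropLast_eq_take, List.take_take, List.length_take, hMgetD]
          congr 1
          rw [hMgetD] at hrowlen
          omega
        rw [hdl, ← pvTrunc_set M L i (lam0 - 1) hiL h1]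
        have hT1len : (pvTrunc M lam1).length = L.length := by
          rw [pvTrunc_length M lam1 (by omega)]; omega
        have hT1i : (pvTrunc M lam1).getD i [] = (M.getD i []).take (lam0 - 1).toNat := by
          rw [List.getD_eq_getElem _ [] (by omega),
            pvTrunc_getElem M lam1 i (by omega) (by omega), hMgetD]
          congr 2
          simp [hlam1def, List.getElem_set_self]
        by_cases hpop : lam0 - 1 ≤ 0
        · rw [if_pos, if_pos (by rw [hgetD1]; exact hpop)]
          · exact (pvTrunc_dropLast M lam1 (by omega)).symm
          · rw [hT1i, List.isEmpty_iff, List.take_eq_nil_iff]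
            left; omega
        · rw [if_neg, if_neg (by rw [hgetD1]; exact hpop)]
          rw [hT1i, List.isEmpty_iff, List.take_eq_nil_iff]
          intro hc
          rcases hc with hc | hc
          · omega
          · rw [hc] at hrowlen; simp at hrowlen; omega
      -- the invariant is preserved by the shape update
      have hInvStep : pvInv M (if lam1.getD i 0 ≤ 0 then lam1.dropLast else lam1) := by
        by_cases hpop : lam1.getD i 0 ≤ 0
        · rw [if_pos hpop]
          rw [hgetD1] at hpop
          have hall : n = L.length := hall_of hpop
          refine ⟨by simp [hlam1def]; omega, ?_, ?_⟩
          · intro r hr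
            have hr' : r < L.length := by simp [hlam1def] at hr; omega
            have hri : ¬ (i = r) := by simp [hlam1def] at hr; omega
            rw [List.getElem_dropLast]
            simp only [hlam1def, List.getElem_set]
            rw [if_neg hri]
            exact h2 r hr'
          · intro r s hrs hs
            have hs' : s < L.length := by simp [hlam1def] at hs; omega
            have hr' : r < L.length := by omega
            have hsi : ¬ (i = s) := by simp [hlam1def] at hs; omega
            have hri2 : ¬ (i = r) := by simp [hlam1def] at hs; omega
            rw [List.getElem_dropLast, List.getElem_dropLast]
            simp only [hlam1def, List.getElem_set]
            rw [if_neg hsi, if_neg hri2]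
            exact h3 r s hrs hs'
        · rw [if_neg hpop]
          rw [hgetD1] at hpop
          refine ⟨by omega, ?_, ?_⟩
          · intro r hr
            have hr' : r < L.length := by omega
            simp only [hlam1def, List.getElem_set]
            by_cases hir : i = r
            · rw [if_pos hir]
              subst hir
              exact ⟨by omega, by rw [hMgetD]; rw [hMgetD] at hrowlen; omega⟩
            · rw [if_neg hir]
              exact h2 r hr'
          · intro r s hrs hs
            have hs' : s < L.length := by omega
            have hr' : r < L.length := by omega
            simp only [hlam1def, List.getElem_set]
            by_cases his : i = s <;> by_cases hir : i = r
            · rw [if_pos his, if_pos hir]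
            · rw [if_pos his, if_neg hir]
              have h4 : L[i]'hiL ≤ L[r]'hr' := h3 r i (by omega) hiL
              rw [hlami] at h4
              omega
            · rw [if_neg his, if_pos hir]
              have h5 := hafter s hs' (by omega)
              omega
            · rw [if_neg his, if_neg hir]
              exact h3 r s hrs hs'
      have hhead : L.headD 0 = lam0 := by simp [hLdef]
      -- the maintained corner row is correct for the updated shape
      have hrun2 : 0 < i →
          pvRunL ((if lam1.getD i 0 ≤ 0 then lam1.dropLast else lam1).headD 0)
            (if lam1.getD i 0 ≤ 0 then lam1.dropLast else lam1) = i := by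
        intro hpos
        by_cases hpop : lam1.getD i 0 ≤ 0
        · rw [if_pos hpop]
          rw [hgetD1] at hpop
          have hall : n = L.length := hall_of hpop
          have hlen2 : lam1.dropLast.length = L.length - 1 := by simp [hlam1def]
          have hhd2 : lam1.dropLast.headD 0 = lam0 := by
            rw [pvHeadD_getD, List.getD_eq_getElem _ 0 (by omega), List.getElem_dropLast]
            simp only [hlam1def, List.getElem_set]
            rw [if_neg (by omega)]
            simp [hLdef]
          rw [hhd2]
          apply pvRunL_eq lam0 lam1.dropLast i (by omega)
          · intro r hr
            rw [List.getD_eq_getElem _ 0 (by omega), List.getElem_dropLast]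
            simp only [hlam1def, List.getElem_set]
            rw [if_neg (by omega)]
            exact pvGetElem_lt_runL lam0 L r (by omega) (by omega)
          · intro hlt
            omega
        · rw [if_neg hpop]
          rw [hgetD1] at hpop
          have hhd1 : lam1.headD 0 = lam0 := by
            rw [pvHeadD_getD, List.getD_eq_getElem _ 0 (by omega)]
            simp only [hlam1def, List.getElem_set]
            rw [if_neg (by omega)]
            simp [hLdef]
          rw [hhd1]
          apply pvRunL_eq lam0 lam1 i (by omega)
          · intro r hr
            rw [List.getD_eq_getElem _ 0 (by omega)]
            simp only [hlam1def, List.getElem_set]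
            rw [if_neg (by omega)]
            exact pvGetElem_lt_runL lam0 L r (by omega) (by omega)
          · intro hlt
            rw [List.getD_eq_getElem _ 0 (by omega)]
            simp only [hlam1def, List.getElem_set, if_true]
            omega
      have hi' : (if 0 < i then i - 1 else pvScan (if lam1.getD i 0 ≤ 0 then lam1.dropLast else lam1)) =
          pvRunL ((if lam1.getD i 0 ≤ 0 then lam1.dropLast else lam1).headD 0)
            (if lam1.getD i 0 ≤ 0 then lam1.dropLast else lam1) - 1 := by
        by_cases hpos : 0 < i
        · rw [if_pos hpos, hrun2 hpos]
        · rw [if_neg hpos, pvScan_eq]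
      have hstep : pvCorners M (f + 1) L i acc =
          pvCorners M f (if lam1.getD i 0 ≤ 0 then lam1.dropLast else lam1)
            (if 0 < i then i - 1 else pvScan (if lam1.getD i 0 ≤ 0 then lam1.dropLast else lam1))
            (acc ++ [(i, lam0 - 1, pvGet2 M (i : Int) (lam0 - 1))]) := by
        conv_lhs => rw [pvCorners]
        rw [if_neg (by simp [hLdef])]
        simp only [hgetD]
        rw [← hlam1def]
      have hstepA : pvCornersA (f + 1) (pvTrunc M L) =
          (i, lam0 - 1, pvGet2 M (i : Int) (lam0 - 1)) ::
            pvCornersA f (pvTrunc M (if lam1.getD i 0 ≤ 0 then lam1.dropLast else lam1)) := by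
        conv_lhs => rw [pvCornersA]
        rw [if_neg (by omega)]
        simp only [hTlam, hhead, hfind, hx, hrem]
      rw [hstep, ih _ _ _ hInvStep hi', hstepA]
      simp [List.append_assoc]


-- ===== VERDICT (by name: the statement is the Claim_ definition above) =====
theorem sulzgruber_correspondence_spec : Claim_equal_sulzgruber_correspondence := by
  intro M _ hPre
  simp only [Spec_sulzgruber_correspondence, sulzgruber_correspondence,
    sulzgruber_correspondence_alt]
  have hInv0 : pvInv M (M.map (fun r => ((r.length : Int)))) := by
    obtain ⟨hne, hdec⟩ := hPre
    refine ⟨by simp, ?_, ?_⟩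
    · intro r hr
      have hr' : r < M.length := by simpa using hr
      simp only [List.getElem_map]
      refine ⟨?_, ?_⟩
      · have h0 : M[r] ≠ [] := hne M[r] (List.getElem_mem hr')
        have := List.length_pos_of_ne_nil h0
        omega
      · rw [List.getD_eq_getElem M [] hr']
    · intro r s hrs hs
      have hs' : s < M.length := by simpa using hs
      have hr' : r < M.length := by omega
      simp only [List.getElem_map]
      rcases Nat.lt_or_ge r s with hlt | hge
      · have := (List.pairwise_iff_getElem.1 hdec) r s hr' hs' hlt
        exact_mod_cast this
      · have : r = s := by omega
        subst this
        exact le_refl _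
  rw [pvSulzA_eq_foldr, pvCorners_eq M _ _ _ [] hInv0 (pvScan_eq _), pvTrunc_full,
    List.nil_append, List.foldl_reverse]
  have hfun : (fun (c : Nat × Int × Int) (N : List (List Int)) => pvToggleA c.1 c.2.1 c.2.2 N) =
      (fun (c : Nat × Int × Int) (N : List (List Int)) => pvToggleB c.1 c.2.1 c.2.2 N) := by
    funext c N
    exact pvToggle_eq c.1 c.2.1 c.2.2 N
  rw [hfun]
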